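-- pv_equiv track=rewrite | github.com/mdandre89/Codewars-exercises | the-skiponacci-sequence/the-skiponacci-sequence.py | skiponacci
-- ===== SOURCE A (Python) =====
-- cache = {0: 0, 1: 1}
--
-- def fibonacci_of(n):
--     if n in cache:  # Base case
--         return cache[n]
--     # Compute and cache the Fibonacci number
--     cache[n] = fibonacci_of(n - 1) + fibonacci_of(n - 2)  # Recursive case
--     return cache[n]
--
-- def skiponacci(n):
--     s = ''
--     for i in range(1, n+1):
--         if i%2 == 0:
--             s += ' skip '
--         else:
--             s += str(fibonacci_of(i))
--     return s.strip()
-- ===== SOURCE B (Python) =====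
-- def skiponacci(n):
--     tokens = []
--     a, b = 0, 1
--     for i in range(1, n + 1):
--         a, b = b, a + b
--         tokens.append('skip' if i % 2 == 0 else str(a))
--     return ' '.join(tokens)
-- ===== Notes on version B (the rewrite author's own statement) =====
-- stated objective: simpler
-- what changed: Replaces the recursive memoized Fibonacci with a global cache by an iterative running pair (a,b), and the repeated string concatenation plus final strip by collecting tokens in a list and a single ' '.join.
import Mathlib
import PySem

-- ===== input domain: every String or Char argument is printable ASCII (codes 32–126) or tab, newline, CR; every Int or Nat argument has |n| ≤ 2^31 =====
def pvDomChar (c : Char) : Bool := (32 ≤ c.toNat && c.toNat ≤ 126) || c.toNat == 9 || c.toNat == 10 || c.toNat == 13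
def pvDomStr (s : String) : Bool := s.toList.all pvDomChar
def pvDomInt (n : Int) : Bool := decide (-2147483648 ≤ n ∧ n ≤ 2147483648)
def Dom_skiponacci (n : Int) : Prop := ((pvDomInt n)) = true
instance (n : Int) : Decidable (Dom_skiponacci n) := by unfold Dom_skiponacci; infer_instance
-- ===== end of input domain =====

-- B builds the token list once and joins it, with an iterative (a, b) Fibonacci pair instead of
-- A's recursive memoized fib (A also mutates a module-level cache; the return value is unaffected).

-- ===== PORT A =====
-- fibonacci_of with the module-level cache {0: 0, 1: 1} threaded through; recursion on the
-- fuel n.toNat, which suffices for every call skiponacci makes because 0 and 1 are cached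
-- (the fuel-0 branch is unreachable in those calls).
def fibonacciOf (fuel : Nat) (cache : PySem.Dict Int Int) (n : Int) :
    PySem.Dict Int Int × Int :=
  if PySem.Dict.contains cache n then (cache, PySem.Dict.getD cache n 0)
  else
    match fuel with
    | 0 => (cache, 0)
    | f + 1 =>
      let r1 := fibonacciOf f cache (n - 1)
      let r2 := fibonacciOf f r1.1 (n - 2)
      (PySem.Dict.insert r2.1 n (r1.2 + r2.2), r1.2 + r2.2)

def skiponacci (n : Int) : String :=
  let st := (PySem.List.pyRange 1 (n + 1) 1).foldl
    (fun (st : PySem.Dict Int Int × String) i =>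
      if PySem.Int.mod i 2 = 0 then (st.1, st.2 ++ " skip ")
      else
        let r := fibonacciOf i.toNat st.1 i
        (r.1, st.2 ++ PySem.Int.toStr r.2))
    (PySem.Dict.ofList [(0, 0), (1, 1)], "")
  PySem.Str.strip st.2

-- ===== PORT B =====
def skiponacci_alt (n : Int) : String :=
  let st := (PySem.List.pyRange 1 (n + 1) 1).foldl
    (fun (st : (Int × Int) × List String) i =>
      let a := st.1.2
      let b := st.1.1 + st.1.2
      ((a, b), st.2 ++ [if PySem.Int.mod i 2 = 0 then "skip" else PySem.Int.toStr a]))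
    ((0, 1), ([] : List String))
  PySem.Str.join " " st.2

-- ===== PRECONDITION & SPEC =====
def Spec_skiponacci (n : Int) (out : String) : Prop := out = skiponacci_alt n
instance (n : Int) (out : String) : Decidable (Spec_skiponacci n out) := by unfold Spec_skiponacci; infer_instance

-- ===== CLAIM (what is proved, stated in full; the proofs are below) =====
def Claim_equal_skiponacci : Prop := ∀ (n : Int), Dom_skiponacci n → Spec_skiponacci n (skiponacci n)

-- ===== LEMMAS AND PROOFS =====

-- the mathematical Fibonacci numbers, for the proofs only
def fibN : Nat → Int
  | 0 => 0
  | 1 => 1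
  | m + 2 => fibN (m + 1) + fibN m

lemma fibN_aux : ∀ m : Nat, 0 ≤ fibN m ∧ 1 ≤ fibN (m + 1) := by
  intro m
  induction m with
  | zero => exact ⟨le_refl 0, le_refl 1⟩
  | succ m ih =>
    have h : fibN (m + 2) = fibN (m + 1) + fibN m := rfl
    exact ⟨by omega, by rw [show m + 1 + 1 = m + 2 from rfl, h]; omega⟩

lemma fibN_pos (m : Nat) : 1 ≤ fibN (m + 1) := (fibN_aux m).2

-- invariant of A's memo cache: every stored entry is the Fibonacci number of its key
def GoodCache (c : PySem.Dict Int Int) : Prop :=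
  c.keys.Nodup ∧ c.get? 0 = some 0 ∧ c.get? 1 = some 1 ∧
    ∀ p ∈ c.items, 0 ≤ p.1 ∧ p.2 = fibN p.1.toNat

lemma fib_hit (fuel : Nat) (c : PySem.Dict Int Int) (n : Int) (hg : GoodCache c)
    (hc : PySem.Dict.contains c n = true) :
    fibonacciOf fuel c n = (c, fibN n.toNat) := by
  obtain ⟨v, hv⟩ : ∃ v, c.get? n = some v := by
    rw [PySem.Dict.contains_eq_isSome_get?] at hc
    exact Option.isSome_iff_exists.mp hc
  have hp := hg.2.2.2 _ (PySem.Dict.mem_items_of_get?_eq_some c hv)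
  rw [fibonacciOf.eq_def, if_pos hc, PySem.Dict.getD_eq_get?_getD, hv]
  exact Prod.ext rfl hp.2

lemma fib_spec (fuel : Nat) : ∀ (c : PySem.Dict Int Int) (n : Int), GoodCache c → 0 ≤ n →
    n.toNat ≤ fuel + 1 →
    (fibonacciOf fuel c n).2 = fibN n.toNat ∧ GoodCache (fibonacciOf fuel c n).1 := by
  induction fuel with
  | zero =>
    intro c n hg hn hf
    by_cases hc : PySem.Dict.contains c n = true
    · rw [fib_hit 0 c n hg hc]; exact ⟨rfl, hg⟩
    · exfalso
      have : n = 0 ∨ n = 1 := by omega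
      rcases this with rfl | rfl
      · rw [PySem.Dict.contains_eq_isSome_get?, hg.2.1] at hc; simp at hc
      · rw [PySem.Dict.contains_eq_isSome_get?, hg.2.2.1] at hc; simp at hc
  | succ f ih =>
    intro c n hg hn hf
    by_cases hc : PySem.Dict.contains c n = true
    · rw [fib_hit (f + 1) c n hg hc]; exact ⟨rfl, hg⟩
    · have hc' : PySem.Dict.contains c n = false := by
        exact Bool.eq_false_iff.mpr (fun h => hc h)
      have h2 : 2 ≤ n := by
        by_contra h
        have : n = 0 ∨ n = 1 := by omega
        rcases this with rfl | rfl
        · rw [PySem.Dict.contains_eq_isSome_get?, hg.2.1] at hc'; simp at hc'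
        · rw [PySem.Dict.contains_eq_isSome_get?, hg.2.2.1] at hc'; simp at hc'
      have e : fibonacciOf (f + 1) c n =
          (PySem.Dict.insert (fibonacciOf f (fibonacciOf f c (n - 1)).1 (n - 2)).1 n
              ((fibonacciOf f c (n - 1)).2 + (fibonacciOf f (fibonacciOf f c (n - 1)).1 (n - 2)).2),
            (fibonacciOf f c (n - 1)).2 + (fibonacciOf f (fibonacciOf f c (n - 1)).1 (n - 2)).2) := by
        rw [fibonacciOf.eq_def]
        simp [hc']
      obtain ⟨e1, g1⟩ := ih c (n - 1) hg (by omega) (by omega)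
      obtain ⟨e2, g2⟩ := ih (fibonacciOf f c (n - 1)).1 (n - 2) g1 (by omega) (by omega)
      have hfib : fibN (n - 1).toNat + fibN (n - 2).toNat = fibN n.toNat := by
        obtain ⟨m, rfl⟩ : ∃ m : Nat, n = (m : Int) + 2 := ⟨(n - 2).toNat, by omega⟩
        have q1 : ((m : Int) + 2 - 1).toNat = m + 1 := by omega
        have q2 : ((m : Int) + 2 - 2).toNat = m := by omega
        have q3 : ((m : Int) + 2).toNat = m + 2 := by omega
        rw [q1, q2, q3]
        exact (rfl : fibN (m + 2) = fibN (m + 1) + fibN m).symm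
      refine ⟨?_, ?_⟩
      · rw [e]; dsimp only; rw [e1, e2]; exact hfib
      · rw [e]; dsimp only
        refine ⟨PySem.Dict.nodup_keys_insert _ _ _ g2.1, ?_, ?_, ?_⟩
        · rw [PySem.Dict.get?_insert, if_neg (by omega : (0 : Int) ≠ n)]; exact g2.2.1
        · rw [PySem.Dict.get?_insert, if_neg (by omega : (1 : Int) ≠ n)]; exact g2.2.2.1
        · intro p hp
          rcases (PySem.Dict.mem_items_insert _ _ _ p).mp hp with rfl | ⟨hp', _⟩
          · exact ⟨by omega, by dsimp only; rw [e1, e2]; exact hfib⟩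
          · exact g2.2.2.2 p hp'

-- A's loop step and B's loop step, named for the proofs (definitionally the lambdas in the ports)
def stepA (st : PySem.Dict Int Int × String) (i : Int) : PySem.Dict Int Int × String :=
  if PySem.Int.mod i 2 = 0 then (st.1, st.2 ++ " skip ")
  else
    let r := fibonacciOf i.toNat st.1 i
    (r.1, st.2 ++ PySem.Int.toStr r.2)

def stepB (st : (Int × Int) × List String) (i : Int) : (Int × Int) × List String :=
  let a := st.1.2
  let b := st.1.1 + st.1.2
  ((a, b), st.2 ++ [if PySem.Int.mod i 2 = 0 then "skip" else PySem.Int.toStr a])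

def initA : PySem.Dict Int Int × String := (PySem.Dict.ofList [(0, 0), (1, 1)], "")

def J (ts : List String) : List Char := PySem.Chars.join [' '] (ts.map String.toList)

lemma join_append_singleton (sep : List Char) :
    ∀ (xs : List (List Char)) (y : List Char), xs ≠ [] →
    PySem.Chars.join sep (xs ++ [y]) = PySem.Chars.join sep xs ++ sep ++ y := by
  intro xs
  induction xs with
  | nil => intro y h; exact absurd rfl h
  | cons x xs ih =>
    intro y _
    cases xs with
    | nil =>
      simp only [List.cons_append, List.nil_append, PySem.Chars.join_cons_cons,
        PySem.Chars.join_singleton]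
    | cons x' rest =>
      have hih := ih y (by simp)
      simp only [List.cons_append] at hih ⊢
      rw [PySem.Chars.join_cons_cons, PySem.Chars.join_cons_cons, hih]
      simp [List.append_assoc]

lemma digitChar_nonspace (n : Nat) : PySem.Chars.isspace n.digitChar = false := by
  rcases Nat.lt_or_ge n 16 with h | h
  · interval_cases n <;> decide
  · have e : n.digitChar = '*' := by
      unfold Nat.digitChar
      rw [if_neg (by omega), if_neg (by omega), if_neg (by omega), if_neg (by omega),
        if_neg (by omega), if_neg (by omega), if_neg (by omega), if_neg (by omega),
        if_neg (by omega), if_neg (by omega), if_neg (by omega), if_neg (by omega),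
        if_neg (by omega), if_neg (by omega), if_neg (by omega), if_neg (by omega)]
    rw [e]
    decide

lemma toDigitsCore_succ (b f n : Nat) (ds : List Char) :
    Nat.toDigitsCore b (f + 1) n ds =
      if n / b = 0 then (n % b).digitChar :: ds
      else Nat.toDigitsCore b f (n / b) ((n % b).digitChar :: ds) := rfl

lemma toDigitsCore_nonspace (b : Nat) : ∀ (f n : Nat) (ds : List Char),
    (∀ c ∈ ds, PySem.Chars.isspace c = false) →
    ∀ c ∈ Nat.toDigitsCore b f n ds, PySem.Chars.isspace c = false := by
  intro f
  induction f with
  | zero => intro n ds h c hc; exact h c hc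
  | succ f ih =>
    intro n ds h c hc
    rw [toDigitsCore_succ] at hc
    split_ifs at hc with h0
    · rcases List.mem_cons.mp hc with rfl | hm
      · exact digitChar_nonspace _
      · exact h c hm
    · refine ih _ _ ?_ c hc
      intro c' hc'
      rcases List.mem_cons.mp hc' with rfl | hm
      · exact digitChar_nonspace _
      · exact h c' hm

lemma toDigitsCore_ne_nil_of_ne (b : Nat) : ∀ (f n : Nat) (ds : List Char), ds ≠ [] →
    Nat.toDigitsCore b f n ds ≠ [] := by
  intro f
  induction f with
  | zero => intro n ds h; exact h
  | succ f ih =>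
    intro n ds h
    rw [toDigitsCore_succ]
    split_ifs with h0
    · simp
    · exact ih _ _ (by simp)

lemma toDigitsCore_succ_ne_nil (b f n : Nat) (ds : List Char) :
    Nat.toDigitsCore b (f + 1) n ds ≠ [] := by
  rw [toDigitsCore_succ]
  split_ifs with h0
  · simp
  · exact toDigitsCore_ne_nil_of_ne _ _ _ _ (by simp)

-- str(v) of a positive int ends in a non-space character
lemma digit_chars_nonspace (v : Int) (h : 1 ≤ v) :
    ∃ l c, PySem.Int.toChars v = l ++ [c] ∧ PySem.Chars.isspace c = false := by
  have hneg : ¬ v < 0 := by omega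
  have hdef : PySem.Int.toChars v = Nat.toDigits 10 v.toNat := by
    simp [PySem.Int.toChars, hneg]
  have hd : Nat.toDigits 10 v.toNat = Nat.toDigitsCore 10 (v.toNat + 1) v.toNat [] := rfl
  have hne : Nat.toDigits 10 v.toNat ≠ [] := by
    rw [hd]; exact toDigitsCore_succ_ne_nil _ _ _ _
  have hall : ∀ c ∈ Nat.toDigits 10 v.toNat, PySem.Chars.isspace c = false := by
    rw [hd]; exact toDigitsCore_nonspace 10 _ _ [] (by simp)
  refine ⟨(Nat.toDigits 10 v.toNat).dropLast, (Nat.toDigits 10 v.toNat).getLast hne, ?_, ?_⟩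
  · rw [hdef, List.dropLast_append_getLast hne]
  · exact hall _ (List.getLast_mem hne)

lemma strip_nice (cs : List Char) (c₁ : Char) (tl₁ : List Char) (h₁ : cs = c₁ :: tl₁)
    (hs₁ : PySem.Chars.isspace c₁ = false)
    (tl₂ : List Char) (c₂ : Char) (h₂ : cs = tl₂ ++ [c₂])
    (hs₂ : PySem.Chars.isspace c₂ = false)
    (trail : List Char) (ht : trail = [] ∨ trail = [' ']) :
    PySem.Chars.strip (cs ++ trail) = cs := by
  have hl : PySem.Chars.lstrip (cs ++ trail) = cs ++ trail := by
    rw [h₁]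
    simp [PySem.Chars.lstrip, hs₁]
  have hr : PySem.Chars.rstrip (cs ++ trail) = cs := by
    rcases ht with rfl | rfl
    · rw [List.append_nil, h₂]
      simp [PySem.Chars.rstrip, hs₂]
    · rw [h₂]
      simp [PySem.Chars.rstrip, hs₂,
        show PySem.Chars.isspace ' ' = true from rfl]
  rw [PySem.Chars.strip, hl, hr]

-- the joint loop invariant after processing i = 1 .. k
lemma loop_inv (k : Nat) (hk : 1 ≤ k) :
    GoodCache ((PySem.List.pyRange 1 ((k : Int) + 1) 1).foldl stepA initA).1 ∧
    ((PySem.List.pyRange 1 ((k : Int) + 1) 1).foldl stepB ((0, 1), [])).1.1 = fibN k ∧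
    ((PySem.List.pyRange 1 ((k : Int) + 1) 1).foldl stepB ((0, 1), [])).1.2 = fibN (k + 1) ∧
    (∃ tl, J ((PySem.List.pyRange 1 ((k : Int) + 1) 1).foldl stepB ((0, 1), [])).2 = '1' :: tl) ∧
    (∃ tl c, J ((PySem.List.pyRange 1 ((k : Int) + 1) 1).foldl stepB ((0, 1), [])).2 = tl ++ [c] ∧
      PySem.Chars.isspace c = false) ∧
    ((PySem.List.pyRange 1 ((k : Int) + 1) 1).foldl stepA initA).2.toList =
      J ((PySem.List.pyRange 1 ((k : Int) + 1) 1).foldl stepB ((0, 1), [])).2 ++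
        (if k % 2 = 0 then [' '] else []) := by
  induction k with
  | zero => omega
  | succ k ih =>
    rcases Nat.eq_zero_or_pos k with rfl | hk1
    · -- base case k + 1 = 1
      have hr : PySem.List.pyRange 1 (((0 + 1 : Nat) : Int) + 1) 1 = [1] := by decide
      rw [hr]
      simp only [List.foldl_cons, List.foldl_nil]
      refine ⟨?_, by decide, by decide, ⟨[], by decide⟩, ⟨[], '1', by decide, by decide⟩, by decide⟩
      unfold GoodCache
      exact ⟨by decide, by decide, by decide, by decide⟩
    · obtain ⟨hA, ha, hb, ⟨tl0, hhead⟩, ⟨tle, ce, hlast, hce⟩, hs⟩ := ih hk1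
      have hcast : ((k + 1 : Nat) : Int) + 1 = ((k : Int) + 1) + 1 := by push_cast; ring
      have hsplit : PySem.List.pyRange 1 (((k + 1 : Nat) : Int) + 1) 1
          = PySem.List.pyRange 1 ((k : Int) + 1) 1 ++ [(k : Int) + 1] := by
        rw [hcast, PySem.List.pyRange_one_succ_right (by omega : (1 : Int) ≤ (k : Int) + 1)]
      rw [hsplit, List.foldl_append, List.foldl_append]
      simp only [List.foldl_cons, List.foldl_nil]
      have hmod : PySem.Int.mod ((k : Int) + 1) 2 = (((k + 1) % 2 : Nat) : Int) := by
        exact_mod_cast PySem.Int.mod_natCast (k + 1) 2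
      have htoNat : ((k : Int) + 1).toNat = k + 1 := by omega
      have hts : ((PySem.List.pyRange 1 ((k : Int) + 1) 1).foldl stepB ((0, 1), [])).2 ≠ [] := by
        intro h
        rw [h] at hhead
        simp [J, PySem.Chars.join_nil] at hhead
      rcases Nat.mod_two_eq_zero_or_one (k + 1) with hpar | hpar
      · -- i = k + 1 even: both sides emit the skip token
        have hkpar : ¬ k % 2 = 0 := by omega
        have hcond : PySem.Int.mod ((k : Int) + 1) 2 = 0 := by rw [hmod, hpar]; rfl
        have hstepA : stepA ((PySem.List.pyRange 1 ((k : Int) + 1) 1).foldl stepA initA) ((k : Int) + 1)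
            = (((PySem.List.pyRange 1 ((k : Int) + 1) 1).foldl stepA initA).1,
               ((PySem.List.pyRange 1 ((k : Int) + 1) 1).foldl stepA initA).2 ++ " skip ") := by
          rw [stepA, if_pos hcond]
        have hstepB : stepB ((PySem.List.pyRange 1 ((k : Int) + 1) 1).foldl stepB ((0, 1), [])) ((k : Int) + 1)
            = ((((PySem.List.pyRange 1 ((k : Int) + 1) 1).foldl stepB ((0, 1), [])).1.2,
                ((PySem.List.pyRange 1 ((k : Int) + 1) 1).foldl stepB ((0, 1), [])).1.1
                  + ((PySem.List.pyRange 1 ((k : Int) + 1) 1).foldl stepB ((0, 1), [])).1.2),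
               ((PySem.List.pyRange 1 ((k : Int) + 1) 1).foldl stepB ((0, 1), [])).2 ++ ["skip"]) := by
          simp only [stepB]
          rw [if_pos hcond]
        have hJ' : J (((PySem.List.pyRange 1 ((k : Int) + 1) 1).foldl stepB ((0, 1), [])).2 ++ ["skip"])
            = J ((PySem.List.pyRange 1 ((k : Int) + 1) 1).foldl stepB ((0, 1), [])).2
                ++ [' '] ++ ['s', 'k', 'i', 'p'] := by
          have h1 : (((PySem.List.pyRange 1 ((k : Int) + 1) 1).foldl stepB ((0, 1), [])).2 ++ ["skip"]).map String.toList
              = (((PySem.List.pyRange 1 ((k : Int) + 1) 1).foldl stepB ((0, 1), [])).2).map String.toList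
                  ++ [['s', 'k', 'i', 'p']] := by
            rw [List.map_append]; rfl
          rw [J, h1, join_append_singleton _ _ _ (by simpa using hts)]
          rfl
        rw [hstepA, hstepB]
        refine ⟨hA, hb, ?_, ?_, ?_, ?_⟩
        · have hf2 : fibN (k + 1 + 1) = fibN (k + 1) + fibN k := rfl
          dsimp only
          omega
        · exact ⟨tl0 ++ [' ', 's', 'k', 'i', 'p'], by rw [hJ', hhead]; simp⟩
        · refine ⟨J ((PySem.List.pyRange 1 ((k : Int) + 1) 1).foldl stepB ((0, 1), [])).2
              ++ [' '] ++ ['s', 'k', 'i'], 'p', ?_, by decide⟩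
          rw [hJ']; simp
        · rw [String.toList_append, hs, if_neg hkpar, hJ', if_pos hpar,
            show (" skip " : String).toList = [' ', 's', 'k', 'i', 'p', ' '] from rfl]
          simp
      · -- i = k + 1 odd: both sides emit str(fib(k+1))
        have hkpar : k % 2 = 0 := by omega
        have hcond : ¬ PySem.Int.mod ((k : Int) + 1) 2 = 0 := by rw [hmod, hpar]; decide
        have hfs := fib_spec (k + 1) ((PySem.List.pyRange 1 ((k : Int) + 1) 1).foldl stepA initA).1
          ((k : Int) + 1) hA (by omega) (by omega)
        rw [htoNat] at hfs
        have hstepA : stepA ((PySem.List.pyRange 1 ((k : Int) + 1) 1).foldl stepA initA) ((k : Int) + 1)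
            = ((fibonacciOf (k + 1) ((PySem.List.pyRange 1 ((k : Int) + 1) 1).foldl stepA initA).1 ((k : Int) + 1)).1,
               ((PySem.List.pyRange 1 ((k : Int) + 1) 1).foldl stepA initA).2
                 ++ PySem.Int.toStr (fibonacciOf (k + 1) ((PySem.List.pyRange 1 ((k : Int) + 1) 1).foldl stepA initA).1 ((k : Int) + 1)).2) := by
          simp only [stepA]
          rw [if_neg hcond, htoNat]
        have hstepB : stepB ((PySem.List.pyRange 1 ((k : Int) + 1) 1).foldl stepB ((0, 1), [])) ((k : Int) + 1)
            = ((((PySem.List.pyRange 1 ((k : Int) + 1) 1).foldl stepB ((0, 1), [])).1.2,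
                ((PySem.List.pyRange 1 ((k : Int) + 1) 1).foldl stepB ((0, 1), [])).1.1
                  + ((PySem.List.pyRange 1 ((k : Int) + 1) 1).foldl stepB ((0, 1), [])).1.2),
               ((PySem.List.pyRange 1 ((k : Int) + 1) 1).foldl stepB ((0, 1), [])).2
                 ++ [PySem.Int.toStr (((PySem.List.pyRange 1 ((k : Int) + 1) 1).foldl stepB ((0, 1), [])).1.2)]) := by
          simp only [stepB]
          rw [if_neg hcond]
        obtain ⟨l, c, hl, hcs⟩ := digit_chars_nonspace (fibN (k + 1)) (fibN_pos k)
        have hJ' : J (((PySem.List.pyRange 1 ((k : Int) + 1) 1).foldl stepB ((0, 1), [])).2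
              ++ [PySem.Int.toStr (fibN (k + 1))])
            = J ((PySem.List.pyRange 1 ((k : Int) + 1) 1).foldl stepB ((0, 1), [])).2
                ++ [' '] ++ PySem.Int.toChars (fibN (k + 1)) := by
          have h1 : ((((PySem.List.pyRange 1 ((k : Int) + 1) 1).foldl stepB ((0, 1), [])).2
                ++ [PySem.Int.toStr (fibN (k + 1))]).map String.toList)
              = (((PySem.List.pyRange 1 ((k : Int) + 1) 1).foldl stepB ((0, 1), [])).2).map String.toList
                  ++ [PySem.Int.toChars (fibN (k + 1))] := by
            rw [List.map_append, List.map_cons, List.map_nil, PySem.Int.toList_toStr]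
          rw [J, h1, join_append_singleton _ _ _ (by simpa using hts)]
          rfl
        obtain ⟨hfv, hfg⟩ := hfs
        rw [hstepA, hstepB, hb, hfv]
        refine ⟨hfg, rfl, ?_, ?_, ?_, ?_⟩
        · have hf2 : fibN (k + 1 + 1) = fibN (k + 1) + fibN k := rfl
          dsimp only
          omega
        · exact ⟨tl0 ++ [' '] ++ PySem.Int.toChars (fibN (k + 1)), by rw [hJ', hhead]; simp⟩
        · refine ⟨J ((PySem.List.pyRange 1 ((k : Int) + 1) 1).foldl stepB ((0, 1), [])).2
              ++ [' '] ++ l, c, ?_, hcs⟩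
          rw [hJ', hl]; simp
        · rw [String.toList_append, hs, if_pos hkpar, hJ',
            if_neg (by omega : ¬ (k + 1) % 2 = 0), PySem.Int.toList_toStr]
          simp

-- ===== VERDICT (by name: the statement is the Claim_ definition above) =====
theorem skiponacci_spec : Claim_equal_skiponacci := by
  unfold Claim_equal_skiponacci
  intro n _
  unfold Spec_skiponacci
  by_cases hn : n + 1 ≤ 1
  · have hr : PySem.List.pyRange 1 (n + 1) 1 = [] := PySem.List.pyRange_one_eq_nil hn
    rw [← String.toList_inj]
    simp only [skiponacci, skiponacci_alt, hr, List.foldl_nil]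
    decide
  · have hk1 : 1 ≤ n.toNat := by omega
    have hcast : ((n.toNat : Nat) : Int) = n := Int.toNat_of_nonneg (by omega)
    obtain ⟨hA, ha, hb, ⟨tl0, hhead⟩, ⟨tle, ce, hlast, hce⟩, hs⟩ := loop_inv n.toNat hk1
    rw [hcast] at hhead hlast hs
    have e1 : skiponacci n
        = PySem.Str.strip ((PySem.List.pyRange 1 (n + 1) 1).foldl stepA initA).2 := rfl
    have e2 : skiponacci_alt n
        = PySem.Str.join " " ((PySem.List.pyRange 1 (n + 1) 1).foldl stepB ((0, 1), [])).2 := rfl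
    rw [e1, e2, ← String.toList_inj, PySem.Str.toList_strip, PySem.Str.toList_join,
      show (" " : String).toList = [' '] from rfl, hs]
    exact strip_nice _ '1' tl0 hhead (by decide) tle ce hlast hce _
      (by by_cases h : n.toNat % 2 = 0 <;> simp [h])
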